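-- pv_equiv track=rewrite | github.com/yanm90/basic_python | 6 7.py | int_func
-- ===== SOURCE A (Python) =====
-- def int_func(word):
--     """
--     Проверяет переменную на тип данных str, нижний регистр и латиницу
--     При успешноц проверке возвращает с заглавной буквы
--     При ошибке возвращает 'error'
--
--     int_func('word') -> 'Word'
--     """
--     alphabet = 'abcdefghijklmnopqrstuvwxyz'
--     if type(word) != str:
--         return 'error'
--     else:
--         for i in word:
--             if i in alphabet:
--                 continue
--             else:
--                 return 'error'
--         return word.title()
-- ===== SOURCE B (Python) =====
-- import re
--
-- def int_func(word):
--     if type(word) != str: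
--         return 'error'
--     if re.fullmatch(r'[a-z]*', word):
--         return word.title()
--     return 'error'
-- ===== Notes on version B (the rewrite author's own statement) =====
-- stated objective: idiomatic
-- what changed: The hand-written per-character scan against a 26-letter alphabet string (with continue/early-return) is replaced by a single regex fullmatch of [a-z]* that validates the whole string at once.
import Mathlib
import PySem

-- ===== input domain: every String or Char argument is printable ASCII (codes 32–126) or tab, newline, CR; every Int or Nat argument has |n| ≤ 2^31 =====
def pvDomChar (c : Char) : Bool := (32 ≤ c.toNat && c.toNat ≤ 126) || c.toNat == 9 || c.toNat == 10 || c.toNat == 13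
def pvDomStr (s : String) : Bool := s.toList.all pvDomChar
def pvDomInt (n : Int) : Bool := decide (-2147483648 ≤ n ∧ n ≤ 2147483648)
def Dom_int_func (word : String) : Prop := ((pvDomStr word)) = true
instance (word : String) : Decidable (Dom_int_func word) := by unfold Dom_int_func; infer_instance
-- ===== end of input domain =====

-- B replaces A's hand-written per-character scan (with continue/early-return) over a
-- 26-letter alphabet string by a single regex-style fullmatch of [a-z]* (idiomatic).
-- (`type(word) != str` is vacuously false under the String type convention.)

-- shared helper: Python str.title(), exact on ASCII (PySem.Chars.isalpha / upperChar / lowerChar)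
def pyTitleAux : List Char → Bool → List Char
  | [], _ => []
  | c :: rest, prevAlpha =>
    if PySem.Chars.isalpha c then
      (if prevAlpha then PySem.Chars.lowerChar c else PySem.Chars.upperChar c) :: pyTitleAux rest true
    else
      c :: pyTitleAux rest false

def pyTitle (s : String) : String := String.ofList (pyTitleAux s.toList false)

-- ===== PORT A =====
-- the for-loop over the characters of word: first non-alphabet character returns "error"
def int_funcLoop (word : String) : List Char → String
  | [] => pyTitle word
  | c :: rest =>
    if ("abcdefghijklmnopqrstuvwxyz".toList.contains c) then int_funcLoop word rest
    else "error"

def int_func (word : String) : String :=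
  int_funcLoop word word.toList

-- ===== PORT B =====
-- re.fullmatch(r'[a-z]*', word): every character in the class [a-z]
def int_func_alt (word : String) : String :=
  if word.toList.all (fun c => 'a' ≤ c && c ≤ 'z') then pyTitle word else "error"

-- ===== PRECONDITION & SPEC =====
def Spec_int_func (word : String) (out : String) : Prop := out = int_func_alt word
instance (word : String) (out : String) : Decidable (Spec_int_func word out) := by unfold Spec_int_func; infer_instance

-- ===== CLAIM (what is proved, stated in full; the proofs are below) =====
def Claim_equal_int_func : Prop := ∀ (word : String), Dom_int_func word → Spec_int_func word (int_func word)

-- ===== LEMMAS AND PROOFS =====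

set_option maxRecDepth 10000 in
theorem mem_alphabet (c : Char) :
    ("abcdefghijklmnopqrstuvwxyz".toList.contains c) = ('a' ≤ c && c ≤ 'z') := by
  rw [Bool.eq_iff_iff]
  simp only [List.contains_iff_mem, Bool.and_eq_true, decide_eq_true_iff]
  show c ∈ ['a','b','c','d','e','f','g','h','i','j','k','l','m','n','o','p','q','r','s','t','u','v','w','x','y','z'] ↔ _
  simp only [List.mem_cons, List.not_mem_nil, or_false, Char.ext_iff, Char.le_def,
    UInt32.le_iff_toNat_le, UInt32.ext_iff]
  simp only [show ('a').val.toNat = 97 from rfl, show ('b').val.toNat = 98 from rfl,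
    show ('c').val.toNat = 99 from rfl, show ('d').val.toNat = 100 from rfl,
    show ('e').val.toNat = 101 from rfl, show ('f').val.toNat = 102 from rfl,
    show ('g').val.toNat = 103 from rfl, show ('h').val.toNat = 104 from rfl,
    show ('i').val.toNat = 105 from rfl, show ('j').val.toNat = 106 from rfl,
    show ('k').val.toNat = 107 from rfl, show ('l').val.toNat = 108 from rfl,
    show ('m').val.toNat = 109 from rfl, show ('n').val.toNat = 110 from rfl,
    show ('o').val.toNat = 111 from rfl, show ('p').val.toNat = 112 from rfl,
    show ('q').val.toNat = 113 from rfl, show ('r').val.toNat = 114 from rfl,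
    show ('s').val.toNat = 115 from rfl, show ('t').val.toNat = 116 from rfl,
    show ('u').val.toNat = 117 from rfl, show ('v').val.toNat = 118 from rfl,
    show ('w').val.toNat = 119 from rfl, show ('x').val.toNat = 120 from rfl,
    show ('y').val.toNat = 121 from rfl, show ('z').val.toNat = 122 from rfl]
  omega

theorem int_funcLoop_eq (word : String) (l : List Char) :
    int_funcLoop word l = (if l.all (fun c => 'a' ≤ c && c ≤ 'z') then pyTitle word else "error") := by
  induction l with
  | nil => simp [int_funcLoop]
  | cons c rest ih =>
      simp only [int_funcLoop, mem_alphabet, List.all_cons, Bool.and_eq_true]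
      by_cases h : 'a' ≤ c ∧ c ≤ 'z'
      · simp [h, ih]
      · simp [h]

-- ===== VERDICT (by name: the statement is the Claim_ definition above) =====
theorem int_func_spec : Claim_equal_int_func := by
  intro word _
  show int_func word = int_func_alt word
  rw [int_func, int_funcLoop_eq, int_func_alt]
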